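-- pv_equiv track=rewrite | github.com/innewiadro/Codewars | kata_level7/The_poet_and_the_pendulum/The_poet_and_the_pendulum.py | pendulum
-- ===== SOURCE A (Python) =====
-- def pendulum(arr):
--     sorted_arr = sorted(arr)
--
--     result = []
--
--     for i, val in enumerate(sorted_arr):
--         if i % 2 == 0:
--             result.insert(0, val)
--         else:
--             result.append(val)
--
--     return result
-- ===== SOURCE B (Python) =====
-- def pendulum(arr):
--     s = sorted(arr)
--     left = [v for i, v in enumerate(s) if i % 2 == 0]
--     right = [v for i, v in enumerate(s) if i % 2 == 1]
--     return list(reversed(left)) + right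
-- ===== Notes on version B (the rewrite author's own statement) =====
-- stated objective: faster
-- what changed: Instead of building the result by repeated insert(0,...) inside the loop (each a linear shift), B splits the sorted list into the even-index and odd-index elements and returns reversed(evens) + odds.
import Mathlib
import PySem

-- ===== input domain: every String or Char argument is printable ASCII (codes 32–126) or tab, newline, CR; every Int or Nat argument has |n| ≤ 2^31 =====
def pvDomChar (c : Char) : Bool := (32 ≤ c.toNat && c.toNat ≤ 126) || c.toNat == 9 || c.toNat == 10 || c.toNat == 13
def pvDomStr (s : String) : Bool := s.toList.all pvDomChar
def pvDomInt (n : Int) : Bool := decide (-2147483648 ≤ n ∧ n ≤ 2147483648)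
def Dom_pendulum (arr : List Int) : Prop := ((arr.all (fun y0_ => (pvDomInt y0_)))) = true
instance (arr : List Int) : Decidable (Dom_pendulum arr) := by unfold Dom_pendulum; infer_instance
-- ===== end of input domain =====

-- B replaces A's quadratic repeated insert(0, ...) loop by splitting the sorted list into
-- even-index and odd-index halves and returning reversed(evens) ++ odds (objective: faster).


-- ===== PORT A =====
def pendulum (arr : List Int) : List Int :=
  let sorted_arr := PySem.List.sorted arr (fun x => x) false
  (PySem.List.enumerate sorted_arr).foldl
    (fun result iv =>
      if iv.1 % 2 == 0 then PySem.List.insert result 0 iv.2   -- result.insert(0, val)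
      else result ++ [iv.2])                                   -- result.append(val)
    []

-- ===== PORT B =====
def pendulum_alt (arr : List Int) : List Int :=
  let s := PySem.List.sorted arr (fun x => x) false
  let left := ((PySem.List.enumerate s).filter (fun p => p.1 % 2 == 0)).map (·.2)
  let right := ((PySem.List.enumerate s).filter (fun p => p.1 % 2 == 1)).map (·.2)
  left.reverse ++ right

-- ===== PRECONDITION & SPEC =====
def Spec_pendulum (arr : List Int) (out : List Int) : Prop := out = pendulum_alt arr
instance (arr : List Int) (out : List Int) : Decidable (Spec_pendulum arr out) := by unfold Spec_pendulum; infer_instance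

-- ===== CLAIM (what is proved, stated in full; the proofs are below) =====
def Claim_equal_pendulum : Prop := ∀ (arr : List Int), Dom_pendulum arr → Spec_pendulum arr (pendulum arr)

-- ===== LEMMAS AND PROOFS =====

-- A's loop over the enumerated list, started at any index n and accumulator acc,
-- equals reversed(evens) ++ acc ++ odds of the same enumeration.
theorem pendulum_loop (l : List Int) : ∀ (n : Int) (acc : List Int),
    (PySem.List.enumerate l n).foldl
      (fun result iv =>
        if iv.1 % 2 == 0 then PySem.List.insert result 0 iv.2
        else result ++ [iv.2]) acc
    = (((PySem.List.enumerate l n).filter (fun p => p.1 % 2 == 0)).map (·.2)).reverse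
      ++ acc
      ++ ((PySem.List.enumerate l n).filter (fun p => p.1 % 2 == 1)).map (·.2) := by
  induction l with
  | nil => intro n acc; simp [PySem.List.enumerate_nil]
  | cons x rest ih =>
    intro n acc
    rw [PySem.List.enumerate_cons, List.foldl_cons, ih]
    rcases Int.emod_two_eq_zero_or_one n with h | h
    · simp [h, PySem.List.insert_zero]
    · simp [List.filter_cons, h]

theorem pendulum_spec' : ∀ (arr : List Int), pendulum arr = pendulum_alt arr := by
  intro arr
  unfold pendulum pendulum_alt
  rw [pendulum_loop]
  simp

-- ===== VERDICT (by name: the statement is the Claim_ definition above) =====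
theorem pendulum_spec : Claim_equal_pendulum := by
  intro arr _
  unfold Spec_pendulum
  exact pendulum_spec' arr
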